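-- pv_equiv track=rewrite | github.com/minmin2017/ros2_abu | roboarm_ws/src/my_vision_system/my_vision_system/yolo_select_node.py | _decide
-- ===== SOURCE A (Python) =====
-- def _decide(layout, priority):
--     for p_cls in priority:
--         cls_to_slots = {}
--         for slot, cls_id in layout:
--             if cls_id not in cls_to_slots: cls_to_slots[cls_id] = []
--             cls_to_slots[cls_id].append(slot)
--         if p_cls in cls_to_slots:
--             return (min(cls_to_slots[p_cls]), p_cls)
--     return (-1, -1)
-- ===== SOURCE B (Python) =====
-- def _decide(layout, priority):
--     rank = {}
--     for i, cls in enumerate(priority):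
--         if cls not in rank:
--             rank[cls] = i
--     best = None  # (rank, slot, cls)
--     for slot, cls in layout:
--         r = rank.get(cls)
--         if r is None:
--             continue
--         if best is None or (r, slot) < (best[0], best[1]):
--             best = (r, slot, cls)
--     return (-1, -1) if best is None else (best[1], best[2])
-- ===== Notes on version B (the rewrite author's own statement) =====
-- stated objective: faster
-- what changed: Instead of rebuilding a class-to-slots dict for every priority class, B builds a first-occurrence rank dict over priority once and makes a single pass over layout keeping the (rank, slot)-lexicographically smallest candidate.
import Mathlib
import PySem

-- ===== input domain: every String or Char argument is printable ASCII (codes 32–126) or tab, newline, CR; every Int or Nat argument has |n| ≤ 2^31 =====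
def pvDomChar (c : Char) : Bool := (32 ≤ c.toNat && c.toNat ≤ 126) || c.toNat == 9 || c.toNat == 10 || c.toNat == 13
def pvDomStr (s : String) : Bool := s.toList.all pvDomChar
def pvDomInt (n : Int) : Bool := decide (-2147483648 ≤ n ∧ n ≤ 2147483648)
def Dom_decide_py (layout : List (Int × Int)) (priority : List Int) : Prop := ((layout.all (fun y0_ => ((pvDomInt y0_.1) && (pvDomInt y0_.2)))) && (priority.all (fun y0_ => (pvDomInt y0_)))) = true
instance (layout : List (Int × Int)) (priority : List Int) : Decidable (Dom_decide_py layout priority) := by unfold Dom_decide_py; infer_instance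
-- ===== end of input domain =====

-- B replaces A's per-priority dict rebuild by one rank dict over priority plus a single
-- lexicographic-minimum pass over layout (objective: faster, O(n+m) vs O(n*m)).

-- ===== PORT A =====
-- inner loop: cls_to_slots grouping dict (if cls not in d: d[cls] = []; d[cls].append(slot))
def pvBuildDict (layout : List (Int × Int)) : PySem.Dict Int (List Int) :=
  layout.foldl (fun d p =>
    (if d.contains p.2 then d else d.insert p.2 []).modify p.2 [] (fun l => l ++ [p.1]))
    PySem.Dict.empty

def decide_py (layout : List (Int × Int)) (priority : List Int) : Int × Int :=
  match priority with
  | [] => (-1, -1)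
  | p :: rest =>
      let d := pvBuildDict layout
      if d.contains p then
        -- min(cls_to_slots[p_cls]); the list is nonempty when the key is present, .getD 0 is an unreachable guard
        ((PySem.List.min? (d.getD p []) (fun x => x)).getD 0, p)
      else decide_py layout rest

-- ===== PORT B =====
-- rank = {} ; for i, cls in enumerate(priority): if cls not in rank: rank[cls] = i
def pvRankDict (priority : List Int) : PySem.Dict Int Int :=
  (PySem.List.enumerate priority 0).foldl
    (fun r ic => if r.contains ic.2 then r else r.insert ic.2 ic.1) PySem.Dict.empty

-- one fold step of B's candidate loop: keep the (rank, slot)-lex smallest (rank, slot, cls)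
def pvStepB (rank : PySem.Dict Int Int) (best : Option (Int × Int × Int)) (q : Int × Int) :
    Option (Int × Int × Int) :=
  match rank.get? q.2 with
  | none => best
  | some r =>
      match best with
      | none => some (r, q.1, q.2)
      | some b => if r < b.1 ∨ (r = b.1 ∧ q.1 < b.2.1) then some (r, q.1, q.2) else best

def decide_py_alt (layout : List (Int × Int)) (priority : List Int) : Int × Int :=
  let rank := pvRankDict priority
  match layout.foldl (pvStepB rank) none with
  | none => (-1, -1)
  | some b => (b.2.1, b.2.2)

-- ===== PRECONDITION & SPEC =====
def Spec_decide_py (layout : List (Int × Int)) (priority : List Int) (out : Int × Int) : Prop := out = decide_py_alt layout priority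
instance (layout : List (Int × Int)) (priority : List Int) (out : Int × Int) : Decidable (Spec_decide_py layout priority out) := by unfold Spec_decide_py; infer_instance

-- ===== CLAIM (what is proved, stated in full; the proofs are below) =====
def Claim_equal_decide_py : Prop := ∀ (layout : List (Int × Int)) (priority : List Int), Dom_decide_py layout priority → Spec_decide_py layout priority (decide_py layout priority)

-- ===== LEMMAS AND PROOFS =====

-- slots of class c, in layout order; membership characterisation
def pvSlots (c : Int) (layout : List (Int × Int)) : List Int :=
  (layout.filter (fun q => q.2 == c)).map (fun q => q.1)

-- class c present in layout?
def pvPres (layout : List (Int × Int)) (c : Int) : Bool := layout.any (fun q => q.2 == c)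

lemma pvMem_slots (c x : Int) (L : List (Int × Int)) : x ∈ pvSlots c L ↔ (x, c) ∈ L := by
  constructor
  · intro h
    simp only [pvSlots, List.mem_map, List.mem_filter, beq_iff_eq] at h
    obtain ⟨q, ⟨hm, h2⟩, h1⟩ := h
    have : q = (x, c) := by cases q; simp_all
    rwa [this] at hm
  · intro h
    simp only [pvSlots, List.mem_map, List.mem_filter, beq_iff_eq]
    exact ⟨(x, c), ⟨h, rfl⟩, rfl⟩

-- the grouping dict's getD is the slots list
lemma pvBuild_getD (L : List (Int × Int)) (d : PySem.Dict Int (List Int)) (c : Int) :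
    (L.foldl (fun d p =>
      (if d.contains p.2 then d else d.insert p.2 []).modify p.2 [] (fun l => l ++ [p.1])) d).getD c []
    = d.getD c [] ++ pvSlots c L := by
  induction L generalizing d with
  | nil => simp [pvSlots]
  | cons p t ih =>
    rw [List.foldl_cons, ih]
    have h1 : ((if d.contains p.2 then d else d.insert p.2 []).modify p.2 [] (fun l => l ++ [p.1])).getD c []
        = d.getD c [] ++ (if p.2 == c then [p.1] else []) := by
      by_cases hc : c = p.2
      · rw [hc]
        by_cases h : d.contains p.2
        · simp [h, PySem.Dict.getD_modify_self]
        · simp [h, PySem.Dict.getD_modify_self, PySem.Dict.getD_insert_self,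
            PySem.Dict.getD_of_not_contains d [] (by simpa using h)]
      · by_cases h : d.contains p.2
        · simp [h, PySem.Dict.getD_modify_of_ne _ _ _ hc, beq_iff_eq, Ne.symm hc]
        · simp [h, PySem.Dict.getD_modify_of_ne _ _ _ hc,
            PySem.Dict.getD_insert_of_ne _ _ _ hc, beq_iff_eq, Ne.symm hc]
    rw [h1]
    by_cases hc : p.2 = c <;> simp [pvSlots, List.filter_cons, hc]

lemma pvBuild_contains (L : List (Int × Int)) (d : PySem.Dict Int (List Int)) (c : Int) :
    (L.foldl (fun d p =>
      (if d.contains p.2 then d else d.insert p.2 []).modify p.2 [] (fun l => l ++ [p.1])) d).contains c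
    = (d.contains c || L.any (fun q => q.2 == c)) := by
  induction L generalizing d with
  | nil => simp
  | cons p t ih =>
    rw [List.foldl_cons, ih]
    have h1 : ((if d.contains p.2 then d else d.insert p.2 []).modify p.2 [] (fun l => l ++ [p.1])).contains c
        = (c == p.2 || d.contains c) := by
      by_cases h : d.contains p.2 <;>
        simp [h, PySem.Dict.contains_modify, PySem.Dict.contains_insert]
    rw [h1]
    have hsymm : (p.2 == c) = (c == p.2) := by simp [beq_iff_eq, eq_comm]
    simp only [List.any_cons, hsymm]
    cases (c == p.2) <;> cases d.contains c <;> simp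

-- the rank dict looks up the first index in priority
lemma pvRank_fold_get? (pr : List Int) (c : Int) : ∀ (s : Int) (d : PySem.Dict Int Int),
    ((PySem.List.enumerate pr s).foldl
      (fun r ic => if r.contains ic.2 then r else r.insert ic.2 ic.1) d).get? c
    = if d.contains c then d.get? c else (PySem.List.index? pr c).map (fun k => s + (k : Int)) := by
  induction pr with
  | nil =>
    intro s d
    simp [PySem.List.enumerate_nil]
    intro h
    exact (PySem.Dict.get?_eq_none_iff_contains d c).2 (by simpa using h)
  | cons x t ih =>
    intro s d
    rw [PySem.List.enumerate_cons, List.foldl_cons]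
    by_cases hd : d.contains c
    · have hacc : (if d.contains x then d else d.insert x s).contains c = true := by
        by_cases hx : d.contains x <;> simp [hx, PySem.Dict.contains_insert, hd]
      rw [ih (s+1) _]
      rw [hacc]
      simp only [hd, if_true]
      by_cases hx : d.contains x
      · simp [hx]
      · simp only [hx, if_false]
        by_cases hxc : c = x
        · rw [hxc] at hd; simp_all
        · exact PySem.Dict.get?_insert_of_ne d s hxc
    · by_cases hxc : x = c
      · subst hxc
        have hnx : ¬ d.contains x = true := hd
        simp only [hnx, if_false]
        rw [ih (s+1) _]
        rw [PySem.List.index?_eq_idxOf?] at *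
        simp [PySem.Dict.contains_insert_self, PySem.Dict.get?_insert_self, List.idxOf?_cons]
      · have hacc : (if d.contains x then d else d.insert x s).contains c = false := by
          by_cases hx : d.contains x <;>
            simp [hx, PySem.Dict.contains_insert, hd, Ne.symm hxc]
        rw [ih (s+1) _, hacc]
        simp only [hd, if_false]
        rw [PySem.List.index?_cons_of_ne t hxc]
        cases hi : PySem.List.index? t c <;> simp [hi]
        omega

lemma pvRank_get? (pr : List Int) (c : Int) :
    (pvRankDict pr).get? c = (PySem.List.index? pr c).map (fun k => (k : Int)) := by
  unfold pvRankDict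
  rw [pvRank_fold_get? pr c 0 PySem.Dict.empty]
  simp

lemma pvStep_none (rank : PySem.Dict Int Int) (acc : Option (Int × Int × Int)) (q : Int × Int) :
    pvStepB rank acc q = none ↔ acc = none ∧ rank.get? q.2 = none := by
  cases hr : rank.get? q.2 with
  | none => simp [pvStepB, hr]
  | some r0 => cases acc with
    | none => simp [pvStepB, hr]
    | some b => simp [pvStepB, hr]; split <;> simp

-- the step result is lex-≤ any candidate the step saw
lemma pvStep_le (rank : PySem.Dict Int Int) (acc : Option (Int × Int × Int)) (q : Int × Int)
    (r' : Int) (hr : rank.get? q.2 = some r') :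
    ∃ a b c, pvStepB rank acc q = some (a, b, c) ∧ (a < r' ∨ (a = r' ∧ b ≤ q.1)) := by
  cases acc with
  | none => exact ⟨r', q.1, q.2, by simp [pvStepB, hr], Or.inr ⟨rfl, le_refl _⟩⟩
  | some b =>
    by_cases hc : r' < b.1 ∨ (r' = b.1 ∧ q.1 < b.2.1)
    · exact ⟨r', q.1, q.2, by simp [pvStepB, hr, hc], Or.inr ⟨rfl, le_refl _⟩⟩
    · exact ⟨b.1, b.2.1, b.2.2, by simp [pvStepB, hr, hc], by omega⟩

-- the fold result is lex-≤ its starting accumulator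
lemma pvFold_le (rank : PySem.Dict Int Int) (L : List (Int × Int)) :
    ∀ (acc : Option (Int × Int × Int)) (r s c a b cc : Int),
    L.foldl (pvStepB rank) acc = some (r, s, c) → acc = some (a, b, cc) →
    r < a ∨ (r = a ∧ s ≤ b) := by
  induction L with
  | nil =>
    intro acc r s c a b cc h hacc
    rw [List.foldl_nil] at h; rw [hacc] at h
    injection h with h1; injection h1 with h2 h3; injection h3 with h4 h5
    omega
  | cons q t ih =>
    intro acc r s c a b cc h hacc
    subst hacc
    rw [List.foldl_cons] at h
    cases hr : rank.get? q.2 with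
    | none =>
      have hst : pvStepB rank (some (a, b, cc)) q = some (a, b, cc) := by simp [pvStepB, hr]
      rw [hst] at h
      exact ih _ r s c a b cc h rfl
    | some r0 =>
      by_cases hc : r0 < a ∨ (r0 = a ∧ q.1 < b)
      · have hst : pvStepB rank (some (a, b, cc)) q = some (r0, q.1, q.2) := by
          simp [pvStepB, hr, hc]
        rw [hst] at h
        have := ih _ r s c r0 q.1 q.2 h rfl
        omega
      · have hst : pvStepB rank (some (a, b, cc)) q = some (a, b, cc) := by
          simp only [pvStepB, hr, if_neg hc]
        rw [hst] at h
        exact ih _ r s c a b cc h rfl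

-- the fold yields none iff no element of L has a rank
lemma pvFold_none (rank : PySem.Dict Int Int) (L : List (Int × Int)) :
    ∀ (acc : Option (Int × Int × Int)),
    L.foldl (pvStepB rank) acc = none ↔ acc = none ∧ ∀ q ∈ L, rank.get? q.2 = none := by
  induction L with
  | nil => intro acc; simp
  | cons q t ih =>
    intro acc
    rw [List.foldl_cons, ih, pvStep_none]
    constructor
    · rintro ⟨⟨h1, h2⟩, h3⟩
      refine ⟨h1, ?_⟩
      intro x hx
      rcases List.mem_cons.1 hx with h | h
      · rw [h]; exact h2
      · exact h3 x h
    · rintro ⟨h1, h2⟩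
      exact ⟨⟨h1, h2 q (by simp)⟩, fun x hx => h2 x (List.mem_cons_of_mem _ hx)⟩

-- a fold result not from the accumulator is a ranked element of L
lemma pvFold_src (rank : PySem.Dict Int Int) (L : List (Int × Int)) :
    ∀ (acc : Option (Int × Int × Int)) (r s c : Int),
    L.foldl (pvStepB rank) acc = some (r, s, c) →
    acc = some (r, s, c) ∨ ((s, c) ∈ L ∧ rank.get? c = some r) := by
  induction L with
  | nil => intro acc r s c h; rw [List.foldl_nil] at h; exact Or.inl h
  | cons q t ih =>
    intro acc r s c h
    rw [List.foldl_cons] at h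
    rcases ih _ r s c h with hst | hmem
    · cases hr : rank.get? q.2 with
      | none =>
        have : pvStepB rank acc q = acc := by simp [pvStepB, hr]
        rw [this] at hst; exact Or.inl hst
      | some r0 =>
        cases acc with
        | none =>
          have : pvStepB rank none q = some (r0, q.1, q.2) := by simp [pvStepB, hr]
          rw [this] at hst
          injection hst with h1; injection h1 with h2 h3; injection h3 with h4 h5
          right
          constructor
          · rw [← h4, ← h5]; simp
          · rw [← h5, hr, h2]
        | some b =>
          by_cases hc : r0 < b.1 ∨ (r0 = b.1 ∧ q.1 < b.2.1)
          · have : pvStepB rank (some b) q = some (r0, q.1, q.2) := by simp [pvStepB, hr, hc]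
            rw [this] at hst
            injection hst with h1; injection h1 with h2 h3; injection h3 with h4 h5
            right
            constructor
            · rw [← h4, ← h5]; simp
            · rw [← h5, hr, h2]
          · have : pvStepB rank (some b) q = some b := by simp only [pvStepB, hr, if_neg hc]
            rw [this] at hst; exact Or.inl hst
    · exact Or.inr ⟨List.mem_cons_of_mem _ hmem.1, hmem.2⟩

-- the fold result is lex-minimal over all ranked elements of L
lemma pvFold_min (rank : PySem.Dict Int Int) (L : List (Int × Int)) :
    ∀ (acc : Option (Int × Int × Int)) (r s c : Int),
    L.foldl (pvStepB rank) acc = some (r, s, c) →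
    ∀ q ∈ L, ∀ r', rank.get? q.2 = some r' → r < r' ∨ (r = r' ∧ s ≤ q.1) := by
  induction L with
  | nil => intro acc r s c _ q hq; simp at hq
  | cons q t ih =>
    intro acc r s c h x hx r' hr'
    rw [List.foldl_cons] at h
    rcases List.mem_cons.1 hx with hxq | hxt
    · subst hxq
      obtain ⟨a, b, cc, hst, hle⟩ := pvStep_le rank acc x r' hr'
      rw [hst] at h
      have := pvFold_le rank t _ r s c a b cc h rfl
      omega
    · exact ih _ r s c h x hxt r' hr'

-- A computes: first present priority class, paired with the min slot of that class
lemma pvA_eq (layout : List (Int × Int)) (priority : List Int) :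
    decide_py layout priority
    = match priority.find? (pvPres layout) with
      | none => (-1, -1)
      | some p => ((PySem.List.min? (pvSlots p layout) (fun x => x)).getD 0, p) := by
  have hcont : ∀ p, (pvBuildDict layout).contains p = pvPres layout p := by
    intro p
    unfold pvBuildDict pvPres
    rw [pvBuild_contains]
    simp
  have hgetD : ∀ p, (pvBuildDict layout).getD p [] = pvSlots p layout := by
    intro p
    unfold pvBuildDict
    rw [pvBuild_getD]
    simp
  induction priority with
  | nil => simp [decide_py]
  | cons p rest ih =>
    show (if (pvBuildDict layout).contains p then
        ((PySem.List.min? ((pvBuildDict layout).getD p []) (fun x => x)).getD 0, p)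
      else decide_py layout rest) = _
    rw [hcont, hgetD]
    cases hp : pvPres layout p
    · rw [List.find?_cons_of_neg (by simp [hp])]
      simpa using ih
    · rw [List.find?_cons_of_pos hp]
      simp

-- B computes the same
lemma pvB_eq (layout : List (Int × Int)) (priority : List Int) :
    decide_py_alt layout priority
    = match priority.find? (pvPres layout) with
      | none => (-1, -1)
      | some p => ((PySem.List.min? (pvSlots p layout) (fun x => x)).getD 0, p) := by
  have hdef : decide_py_alt layout priority
      = match layout.foldl (pvStepB (pvRankDict priority)) none with
        | none => (-1, -1)
        | some b => (b.2.1, b.2.2) := rfl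
  rw [hdef]
  cases hfind : priority.find? (pvPres layout) with
  | none =>
    have hall := List.find?_eq_none.1 hfind
    have hnone : layout.foldl (pvStepB (pvRankDict priority)) none = none := by
      rw [pvFold_none]
      refine ⟨rfl, ?_⟩
      intro q hq
      rw [pvRank_get?]
      cases hi : PySem.List.index? priority q.2 with
      | none => simp
      | some k =>
        exfalso
        have hmem : q.2 ∈ priority := (PySem.List.index?_isSome_iff priority q.2).1 (by rw [hi]; rfl)
        have := hall q.2 hmem
        have hpres : pvPres layout q.2 = true := by
          unfold pvPres
          exact List.any_eq_true.2 ⟨q, hq, by simp⟩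
        simp [hpres] at this
    rw [hnone]
  | some p =>
    obtain ⟨hp, as, bs, hsplit, hfail⟩ := List.find?_eq_some_iff_append.1 hfind
    subst hsplit
    obtain ⟨q0, hq0, hq0p⟩ := List.any_eq_true.1 hp
    have hq0p : q0.2 = p := by simpa using hq0p
    have hnotin : p ∉ as := by
      intro hmem
      have := hfail p hmem
      simp [hp] at this
    have hidx : PySem.List.index? (as ++ p :: bs) p = some as.length :=
      (PySem.List.index?_eq_some_iff _ p as.length).2 ⟨as, bs, rfl, rfl, hnotin⟩
    have hrkp : (pvRankDict (as ++ p :: bs)).get? p = some (as.length : Int) := by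
      rw [pvRank_get?, hidx]; rfl
    cases hfold : layout.foldl (pvStepB (pvRankDict (as ++ p :: bs))) none with
    | none =>
      exfalso
      have h1 := (pvFold_none (pvRankDict (as ++ p :: bs)) layout none).1 hfold
      have h2 := h1.2 q0 hq0
      rw [hq0p, hrkp] at h2
      simp at h2
    | some b =>
      obtain ⟨r, s, c⟩ := b
      have hsrc := pvFold_src (pvRankDict (as ++ p :: bs)) layout none r s c hfold
      rcases hsrc with hbad | ⟨hmemsc, hrkc⟩
      · simp at hbad
      -- rank of c: some first index k
      have hrkc' := hrkc
      rw [pvRank_get?] at hrkc'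
      cases hi : PySem.List.index? (as ++ p :: bs) c with
      | none => rw [hi] at hrkc'; simp at hrkc'
      | some k =>
        rw [hi] at hrkc'
        have hrk : r = (k : Int) := by simpa using hrkc'.symm
        -- c is present in layout
        have hpresc : pvPres layout c = true :=
          List.any_eq_true.2 ⟨(s, c), hmemsc, by simp⟩
        -- as.length ≤ k (an earlier index would put c among the non-present prefix)
        have hlen : as.length ≤ k := by
          by_contra hlt
          push_neg at hlt
          obtain ⟨hk, hget, -⟩ := PySem.List.getElem_of_index?_eq_some hi
          have hc_as : c ∈ as := by
            have h1 : (as ++ p :: bs)[k]'hk = as[k]'(by omega) :=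
              List.getElem_append_left (by omega)
            rw [h1] at hget
            exact hget ▸ List.getElem_mem _
          have := hfail c hc_as
          simp [hpresc] at this
        -- minimality against q0 gives r ≤ as.length, hence k = as.length
        have hmin := pvFold_min (pvRankDict (as ++ p :: bs)) layout none r s c hfold
        have h0 := hmin q0 hq0 (as.length : Int) (by rw [hq0p, hrkp])
        have hkeq : k = as.length := by omega
        -- c = p (same first index in priority)
        have hcp : c = p := by
          obtain ⟨pre, suf, heq, hlenp, -⟩ := (PySem.List.index?_eq_some_iff _ c k).1 hi
          have h2 := (List.append_inj heq.symm (by omega)).2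
          exact (List.cons_eq_cons.mp h2).1
        subst hcp
        -- s is the min slot of c
        have hs_mem : s ∈ pvSlots c layout := (pvMem_slots c s layout).2 hmemsc
        cases hm : PySem.List.min? (pvSlots c layout) (fun x => x) with
        | none =>
          exfalso
          rw [PySem.List.min?_eq_none_iff] at hm
          rw [hm] at hs_mem
          simp at hs_mem
        | some m =>
          have hm_mem : (m, c) ∈ layout := (pvMem_slots c m layout).1 (PySem.List.min?_mem hm)
          have hms : m ≤ s := PySem.List.min?_isMin hm s hs_mem
          have hsm := hmin (m, c) hm_mem (as.length : Int) (by simpa using hrkp)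
          have hseq : s = m := by omega
          simp [hseq, hm]

-- ===== VERDICT (by name: the statement is the Claim_ definition above) =====
theorem decide_py_spec : Claim_equal_decide_py := by
  intro layout priority _
  unfold Spec_decide_py
  rw [pvA_eq, pvB_eq]
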